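-- pv_equiv track=rewrite | github.com/zehanort/RFdiffusion2 | rf_diffusion/aa_model.py | chain_start_end_from_hal
-- ===== SOURCE A (Python) =====
-- def chain_start_end_from_hal(hal):
--     chains = []
--
--     chain_letters, resi_idxs = zip(*hal)
--
--     previous_chain_letter = chain_letters[0]
--     chain_start = 0
--     total_element_count = 0
--
--     for current_chain_letter in chain_letters:
--         total_element_count += 1
--
--         if current_chain_letter != previous_chain_letter:
--             chains.append((chain_start, total_element_count - 1))
--             previous_chain_letter = current_chain_letter
--             chain_start = total_element_count - 1
--
--     chains.append((chain_start, total_element_count))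
--
--     return chains
-- ===== SOURCE B (Python) =====
-- def chain_start_end_from_hal(hal):
--     chain_letters, resi_idxs = zip(*hal)
--     n = len(chain_letters)
--     boundaries = (
--         [0]
--         + [i + 1 for i, (a, b) in enumerate(zip(chain_letters, chain_letters[1:])) if a != b]
--         + [n]
--     )
--     return list(zip(boundaries, boundaries[1:]))
-- ===== Notes on version B (the rewrite author's own statement) =====
-- stated objective: alternative
-- what changed: B is staged and stateless: it first materialises the full boundary list (0, the positions where adjacent letters differ, n) and then produces the answer by zipping that boundary list with its own tail, instead of A's single stateful pass that tracks previous letter, segment start and a counter while appending segments inline.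
import Mathlib
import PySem

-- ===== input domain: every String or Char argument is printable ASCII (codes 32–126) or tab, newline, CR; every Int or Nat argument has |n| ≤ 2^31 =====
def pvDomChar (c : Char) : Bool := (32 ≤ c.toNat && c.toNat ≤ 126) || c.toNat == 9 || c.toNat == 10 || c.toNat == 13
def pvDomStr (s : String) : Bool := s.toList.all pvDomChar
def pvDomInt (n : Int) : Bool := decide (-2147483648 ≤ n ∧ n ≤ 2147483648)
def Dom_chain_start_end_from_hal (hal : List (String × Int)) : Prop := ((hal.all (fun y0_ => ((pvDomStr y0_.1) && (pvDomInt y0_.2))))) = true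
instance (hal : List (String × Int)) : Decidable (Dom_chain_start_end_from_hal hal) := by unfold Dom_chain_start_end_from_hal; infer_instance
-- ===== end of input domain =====

-- B is staged and stateless: it builds the full boundary list first and then zips it with its tail; objective: alternative.

-- ===== PORT A =====
-- A's loop body on the state (previous_chain_letter, chain_start, total_element_count, chains)
def pvStepA (st : String × Int × Int × List (Int × Int)) (current_chain_letter : String) :
    String × Int × Int × List (Int × Int) :=
  let prev := st.1
  let chain_start := st.2.1
  let total := st.2.2.1 + 1
  let chains := st.2.2.2
  if current_chain_letter ≠ prev then
    (current_chain_letter, total - 1, total, chains ++ [(chain_start, total - 1)])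
  else
    (prev, chain_start, total, chains)

def chain_start_end_from_hal (hal : List (String × Int)) : List (Int × Int) :=
  let chain_letters := hal.map Prod.fst
  match chain_letters with
  | [] => []   -- unreachable under Pre_ (Python's zip-unpack raises ValueError here)
  | p0 :: _ =>
    let st := chain_letters.foldl pvStepA (p0, 0, 0, [])
    st.2.2.2 ++ [(st.2.1, st.2.2.1)]

-- ===== PORT B =====
def chain_start_end_from_hal_alt (hal : List (String × Int)) : List (Int × Int) :=
  let chain_letters := hal.map Prod.fst
  match chain_letters with
  | [] => []   -- unreachable under Pre_ (B's zip-unpack raises ValueError here too)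
  | _ :: _ =>
    let n : Int := chain_letters.length
    let boundaries : List Int :=
      0 :: ((PySem.List.enumerate (chain_letters.zip (PySem.List.slice chain_letters (some 1) none))).filter
              (fun p => p.2.1 ≠ p.2.2)).map (fun p => p.1 + 1) ++ [n]
    boundaries.zip (PySem.List.slice boundaries (some 1) none)

-- ===== PRECONDITION & SPEC =====
-- Pre_ excludes only the empty list, on which Python A raises ValueError (zip-unpack of zero pairs).
def Pre_chain_start_end_from_hal (hal : List (String × Int)) : Prop := hal ≠ []
instance (hal : List (String × Int)) : Decidable (Pre_chain_start_end_from_hal hal) := by unfold Pre_chain_start_end_from_hal; infer_instance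
def pvWitness_chain_start_end_from_hal : (List (String × Int)) := [("A", 1), ("A", 2), ("B", 7)]

def Spec_chain_start_end_from_hal (hal : List (String × Int)) (out : List (Int × Int)) : Prop := out = chain_start_end_from_hal_alt hal
instance (hal : List (String × Int)) (out : List (Int × Int)) : Decidable (Spec_chain_start_end_from_hal hal out) := by unfold Spec_chain_start_end_from_hal; infer_instance

-- ===== CLAIM (what is proved, stated in full; the proofs are below) =====
def Claim_equal_chain_start_end_from_hal : Prop := ∀ (hal : List (String × Int)), Dom_chain_start_end_from_hal hal → Pre_chain_start_end_from_hal hal → Spec_chain_start_end_from_hal hal (chain_start_end_from_hal hal)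

-- ===== LEMMAS AND PROOFS =====

-- run lengths of consecutive equal letters, as A accumulates them
def pvRunLens (c : String) (n : Int) : List String → List Int
  | [] => [n]
  | x :: xs => if x = c then pvRunLens c (n + 1) xs else n :: pvRunLens x 1 xs

-- segments emitted from offset `off` for the given run lengths
def pvSegs (off : Int) : List Int → List (Int × Int)
  | [] => []
  | l :: ls => (off, off + l) :: pvSegs (off + l) ls

-- boundary list starting at position j with previous letter prev (change positions, then the final length)
def pvBounds (j : Int) (prev : String) : List String → List Int
  | [] => [j]
  | x :: xs => if x ≠ prev then j :: pvBounds (j + 1) x xs else pvBounds (j + 1) x xs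

-- partial sums of run lengths, including both endpoints
def pvCumul (off : Int) : List Int → List Int
  | [] => [off]
  | l :: ls => off :: pvCumul (off + l) ls

-- A's fold from an arbitrary state equals the accumulated chains plus the segments of the remaining runs
theorem pvFoldA (xs : List String) (prev : String) (cs tot : Int) (chains : List (Int × Int)) :
    (let st := xs.foldl pvStepA (prev, cs, tot, chains)
     st.2.2.2 ++ [(st.2.1, st.2.2.1)]) = chains ++ pvSegs cs (pvRunLens prev (tot - cs) xs) := by
  induction xs generalizing prev cs tot chains with
  | nil => simp [pvRunLens, pvSegs]
  | cons x rest ih =>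
    by_cases h : x = prev
    · subst h
      have hs : pvStepA (x, cs, tot, chains) x = (x, cs, tot + 1, chains) := by
        simp [pvStepA]
      simp only [List.foldl_cons, hs, ih]
      have he : tot + 1 - cs = (tot - cs) + 1 := by ring
      simp [pvRunLens, he]
    · have hs : pvStepA (prev, cs, tot, chains) x
          = (x, tot, tot + 1, chains ++ [(cs, tot)]) := by
        simp [pvStepA, h]
      simp only [List.foldl_cons, hs, ih]
      have he : tot + 1 - tot = (1 : Int) := by ring
      simp [pvRunLens, pvSegs, h, he]

-- B's enumerate/filter/map stage plus the final endpoint is exactly pvBounds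
theorem pvEnumChg (xs : List String) (c : String) (k : Int) :
    ((PySem.List.enumerate ((c :: xs).zip xs) k).filter (fun p => p.2.1 ≠ p.2.2)).map
        (fun p => p.1 + 1) ++ [k + 1 + xs.length] = pvBounds (k + 1) c xs := by
  induction xs generalizing c k with
  | nil => simp [pvBounds, PySem.List.enumerate_nil]
  | cons x ys ih =>
    by_cases h : x = c
    · subst h
      simp only [List.zip_cons_cons, PySem.List.enumerate_cons, List.filter_cons]
      have := ih x (k + 1)
      simp only [ne_eq, not_true_eq_false, decide_false, Bool.false_eq_true, if_false,
        pvBounds, not_true_eq_false, if_false] at *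
      rw [← this]; congr 1; simp only [List.length_cons]; push_cast; ring_nf
    · simp only [List.zip_cons_cons, PySem.List.enumerate_cons, List.filter_cons]
      have hb : (decide ¬((k, c, x).2.1 = (k, c, x).2.2)) = true := by
        simp; exact fun e => h e.symm
      simp only [hb, if_true, List.map_cons]
      have := ih x (k + 1)
      have hne : x ≠ c := h
      simp only [pvBounds, hne, ne_eq, not_false_eq_true, if_true]
      rw [List.cons_append, ← this]; congr 2; simp only [List.length_cons]; push_cast; ring_nf
-- the partial-sum list of the run lengths is the boundary list
theorem pvCumul_runLens (xs : List String) (prev : String) (m k : Int) :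
    pvCumul k (pvRunLens prev m xs) = k :: pvBounds (k + m) prev xs := by
  induction xs generalizing prev m k with
  | nil => simp [pvRunLens, pvCumul, pvBounds]
  | cons x ys ih =>
    by_cases h : x = prev
    · subst h
      simp only [pvRunLens, if_true, pvBounds, ne_eq, not_true_eq_false, if_false]
      rw [ih x (m + 1) k, show k + (m + 1) = k + m + 1 from by ring]
    · simp only [pvRunLens, h, if_false, pvBounds, ne_eq, not_false_eq_true, if_true, pvCumul]
      rw [ih]

-- zipping a cumulative-sum list shifted by one element yields the segments
theorem pvZip_cumul_aux (lens : List Int) (off b : Int) :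
    (b :: pvCumul off lens).zip (pvCumul off lens) = (b, off) :: pvSegs off lens := by
  induction lens generalizing off b with
  | nil => simp [pvCumul, pvSegs]
  | cons l ls ih =>
    simp only [pvCumul, List.zip_cons_cons, pvSegs]
    rw [ih (off + l) off]

-- zipping a cumulative-sum list with its tail yields the segments
theorem pvZip_cumul (lens : List Int) (off : Int) :
    (pvCumul off lens).zip ((pvCumul off lens).tail) = pvSegs off lens := by
  cases lens with
  | nil => simp [pvCumul, pvSegs]
  | cons l ls =>
    simp only [pvCumul, List.tail_cons, pvSegs]
    rw [pvZip_cumul_aux ls (off + l) off]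

-- ===== VERDICT (by name: the statement is the Claim_ definition above) =====
theorem chain_start_end_from_hal_spec : Claim_equal_chain_start_end_from_hal := by
  intro hal _ hpre
  unfold Spec_chain_start_end_from_hal chain_start_end_from_hal chain_start_end_from_hal_alt
  cases hal with
  | nil => exact absurd rfl hpre
  | cons p rest =>
    simp only [List.map_cons, PySem.List.slice_from_one, List.tail_cons]
    -- A side
    have h0 : pvStepA (p.1, 0, 0, []) p.1 = (p.1, 0, 1, []) := by simp [pvStepA]
    have hA := pvFoldA (rest.map Prod.fst) p.1 0 1 []
    simp only [List.foldl_cons, h0]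
    simp only at hA
    rw [hA]
    -- B side
    have hE := pvEnumChg (rest.map Prod.fst) p.1 0
    have hlen : (0 : Int) + 1 + (rest.map Prod.fst).length
        = ((p.1 :: rest.map Prod.fst).length : Int) := by simp only [List.length_cons]; push_cast; ring
    rw [hlen] at hE
    simp only [List.cons_append]
    rw [show ((PySem.List.enumerate ((p.1 :: rest.map Prod.fst).zip (rest.map Prod.fst)) 0).filter
        (fun p => p.2.1 ≠ p.2.2)).map (fun p => p.1 + 1) ++ [((p.1 :: rest.map Prod.fst).length : Int)]
        = pvBounds (0 + 1) p.1 (rest.map Prod.fst) from hE]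
    have hS := pvCumul_runLens (rest.map Prod.fst) p.1 1 0
    rw [show (0 : Int) + 1 = 1 from rfl] at hS ⊢
    rw [← hS, pvZip_cumul]
    norm_num
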